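-- pv_equiv track=rewrite | github.com/Rajaykumar12/Rook_polynomial | Poly/poly.py | rook_polynomial
-- ===== SOURCE A (Python) =====
-- from itertools import combinations
--
-- def rook_polynomial(board):
--     m, n = len(board), len(board[0])
--     max_rooks = min(m, n)
--     coefficients = []
--
--     def is_valid_placement(placement):
--         rows = set()
--         cols = set()
--         for r, c in placement:
--             if r in rows or c in cols:
--                 return False
--             rows.add(r)
--             cols.add(c)
--         return True
--
--
--     for k in range(max_rooks + 1):
--         valid_placements = 0
--
--         cells = [(r, c) for r in range(m) for c in range(n) if board[r][c] == 1]
--         for placement in combinations(cells, k):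
--             if is_valid_placement(placement):
--                 valid_placements += 1
--         coefficients.append(valid_placements)
--
--
--     polynomial = " + ".join(f"{coef}x^{i}" if i > 0 else str(coef) for i, coef in enumerate(coefficients))
--     return polynomial
-- ===== SOURCE B (Python) =====
-- def rook_polynomial(board):
--     m, n = len(board), len(board[0])
--     max_rooks = min(m, n)
--     cells = [(r, c) for r in range(m) for c in range(n) if board[r][c] == 1]
--
--     def add_shift(a, b):
--         # a + x*b as coefficient lists
--         b = [0] + b
--         return [(a[i] if i < len(a) else 0) + (b[i] if i < len(b) else 0)
--                 for i in range(max(len(a), len(b)))]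
--
--     def poly(cs):
--         # classic rook-polynomial recursion: skip the first cell,
--         # or place a rook there and delete its row and column
--         if not cs:
--             return [1]
--         (r, c), rest = cs[0], cs[1:]
--         deleted = [(r2, c2) for (r2, c2) in rest if r2 != r and c2 != c]
--         return add_shift(poly(rest), poly(deleted))
--
--     p = poly(cells)
--     coefficients = [p[k] if k < len(p) else 0 for k in range(max_rooks + 1)]
--     return " + ".join(f"{coef}x^{i}" if i > 0 else str(coef)
--                       for i, coef in enumerate(coefficients))
-- ===== Notes on version B (the rewrite author's own statement) =====
-- stated objective: faster
-- what changed: Instead of enumerating every k-subset of the board's cells for each k and testing it for attacks, B computes the coefficient list once by the classic rook-polynomial recursion R(cells) = R(cells minus first cell) + x*R(cells minus that cell's row and column), which only ever extends non-attacking placements.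
import Mathlib
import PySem

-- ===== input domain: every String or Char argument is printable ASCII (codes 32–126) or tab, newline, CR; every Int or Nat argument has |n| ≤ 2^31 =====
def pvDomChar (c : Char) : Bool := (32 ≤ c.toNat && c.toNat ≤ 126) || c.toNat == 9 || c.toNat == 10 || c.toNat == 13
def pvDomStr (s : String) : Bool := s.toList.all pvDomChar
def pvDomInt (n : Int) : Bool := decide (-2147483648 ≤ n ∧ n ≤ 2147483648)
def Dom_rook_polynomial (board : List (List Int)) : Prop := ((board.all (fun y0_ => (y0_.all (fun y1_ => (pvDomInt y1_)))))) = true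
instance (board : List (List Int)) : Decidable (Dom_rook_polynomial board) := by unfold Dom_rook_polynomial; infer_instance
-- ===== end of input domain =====

-- B replaces A's per-k enumeration of all k-subsets of cells by the classic rook-polynomial
-- recursion (skip the first cell, or place a rook there and delete its row and column), which
-- prunes attacking placements instead of generating and testing them.

-- ===== PORT A =====
-- cells = [(r, c) for r in range(m) for c in range(n) if board[r][c] == 1]
-- (this comprehension is textually identical in A and in B, hence one shared helper;
--  pyGetD is exact on the indices the comprehension reaches whenever Pre_ holds)
def pvCellsOf (board : List (List Int)) (m n : Int) : List (Int × Int) :=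
  (PySem.List.pyRange 0 m 1).flatMap (fun r =>
    (PySem.List.pyRange 0 n 1).flatMap (fun c =>
      if PySem.List.pyGetD (PySem.List.pyGetD board r []) c 0 == 1 then [(r, c)] else []))

-- " + ".join(f"{coef}x^{i}" if i > 0 else str(coef) for i, coef in enumerate(coefficients))
-- (the final line, textually identical in A and in B)
def pvFormat (coefficients : List Int) : String :=
  PySem.Str.join " + " ((PySem.List.enumerate coefficients 0).map (fun p =>
    if p.1 > 0 then PySem.Int.toStr p.2 ++ "x^" ++ PySem.Int.toStr p.1 else PySem.Int.toStr p.2))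

-- A's is_valid_placement: walk the placement accumulating the rows and cols sets
def pvIsValidA : List (Int × Int) → PySem.Set Int → PySem.Set Int → Bool
  | [], _, _ => true
  | (r, c) :: rest, rows, cols =>
      if PySem.Set.contains rows r || PySem.Set.contains cols c then false
      else pvIsValidA rest (PySem.Set.add rows r) (PySem.Set.add cols c)

def rook_polynomial (board : List (List Int)) : String :=
  let m : Int := board.length
  let n : Int := (PySem.List.pyGetD board 0 []).length  -- board[0]: IndexError on [] — excluded by Pre_
  let max_rooks := min m n
  let coefficients : List Int :=
    (PySem.List.pyRange 0 (max_rooks + 1) 1).foldl (fun acc k =>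
      let cells := pvCellsOf board m n
      let valid_placements :=
        (PySem.List.combinations cells k.toNat).foldl (fun vp placement =>
          if pvIsValidA placement PySem.Set.empty PySem.Set.empty then vp + 1 else vp) (0 : Int)
      acc ++ [valid_placements]) []
  pvFormat coefficients

-- ===== PORT B =====
-- add_shift(a, b): coefficients of a + x*b, padded elementwise
def pvAddShift (a b : List Int) : List Int :=
  let b' := 0 :: b
  (List.range (max a.length b'.length)).map (fun i => a.getD i 0 + b'.getD i 0)

-- poly(cs): skip the first cell, or take it and delete its row and column
def pvPoly : List (Int × Int) → List Int
  | [] => [1]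
  | (r, c) :: rest =>
      pvAddShift (pvPoly rest)
        (pvPoly (rest.filter (fun y => y.1 != r && y.2 != c)))
termination_by cs => cs.length
decreasing_by
  · simp
  · simp only [List.length_cons, List.length_unattach]
    exact Nat.lt_succ_of_le (le_trans (List.length_filter_le _ _) (by simp))

def rook_polynomial_alt (board : List (List Int)) : String :=
  let m : Int := board.length
  let n : Int := (PySem.List.pyGetD board 0 []).length  -- board[0]: IndexError on [] — excluded by Pre_
  let max_rooks := min m n
  let cells := pvCellsOf board m n
  let p := pvPoly cells
  let coefficients : List Int :=
    (PySem.List.pyRange 0 (max_rooks + 1) 1).map (fun k => p.getD k.toNat 0)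
  pvFormat coefficients

-- ===== PRECONDITION & SPEC =====
-- Pre_ excludes exactly the inputs where Python A raises IndexError: the empty board
-- (board[0]) and boards with a row shorter than row 0 (board[r][c] for c < len(board[0])).
def Pre_rook_polynomial (board : List (List Int)) : Prop :=
  board ≠ [] ∧ ∀ row ∈ board, board.headI.length ≤ row.length
instance (board : List (List Int)) : Decidable (Pre_rook_polynomial board) := by
  unfold Pre_rook_polynomial; infer_instance
def pvWitness_rook_polynomial : List (List Int) := [[1, 0], [0, 1]]

def Spec_rook_polynomial (board : List (List Int)) (out : String) : Prop := out = rook_polynomial_alt board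
instance (board : List (List Int)) (out : String) : Decidable (Spec_rook_polynomial board out) := by unfold Spec_rook_polynomial; infer_instance

-- ===== CLAIM (what is proved, stated in full; the proofs are below) =====
def Claim_equal_rook_polynomial : Prop := ∀ (board : List (List Int)), Dom_rook_polynomial board → Pre_rook_polynomial board → Spec_rook_polynomial board (rook_polynomial board)

-- ===== LEMMAS AND PROOFS =====

-- clean validity predicate: pairwise distinct rows and columns
def pvValid : List (Int × Int) → Bool
  | [] => true
  | x :: p => p.all (fun y => y.1 != x.1 && y.2 != x.2) && pvValid p

-- A's accumulator walk computes: all cells avoid the seed sets, and the placement is pvValid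
lemma pvIsValidA_eq (p : List (Int × Int)) : ∀ (rows cols : PySem.Set Int),
    pvIsValidA p rows cols
      = (p.all (fun y => !(PySem.Set.contains rows y.1) && !(PySem.Set.contains cols y.2))
          && pvValid p) := by
  induction p with
  | nil => intro rows cols; simp [pvIsValidA, pvValid]
  | cons x rest ih =>
    intro rows cols
    obtain ⟨r, c⟩ := x
    cases h1 : PySem.Set.contains rows r with
    | true => simp [pysem] at h1; simp [pvIsValidA, pvValid, h1]
    | false =>
    cases h2 : PySem.Set.contains cols c with
    | true =>
      simp [pysem] at h1 h2; simp [pvIsValidA, pvValid, h1, h2]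
    | false =>
      simp only [pvIsValidA, h1, h2, Bool.or_self, Bool.false_eq_true, if_false]
      rw [ih]
      simp [pysem, pvValid] at *
      rw [Bool.eq_iff_iff]
      simp only [Bool.and_eq_true, List.all_eq_true, Bool.not_eq_true', decide_eq_false_iff_not,
        Bool.and_eq_true]
      simp only [bne_iff_ne, ne_eq]
      constructor
      · rintro ⟨ha, hv⟩
        exact ⟨⟨⟨h1, h2⟩, fun x hx => ⟨(ha x hx).1.1, (ha x hx).2.1⟩⟩,
          fun x hx => ⟨(ha x hx).1.2, (ha x hx).2.2⟩, hv⟩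
      · rintro ⟨⟨-, ha⟩, hb, hv⟩
        exact ⟨fun x hx => ⟨⟨(ha x hx).1, (hb x hx).1⟩, (ha x hx).2, (hb x hx).2⟩, hv⟩

lemma pvIsValidA_empty (p : List (Int × Int)) :
    pvIsValidA p PySem.Set.empty PySem.Set.empty = pvValid p := by
  rw [pvIsValidA_eq]
  simp [pysem, PySem.Set.empty]

-- counting combinations that are all-c and V equals counting V-combinations of the c-filtered list
lemma pvKey (c : Int × Int → Bool) :
    ∀ (xs : List (Int × Int)) (k : ℕ) (V : List (Int × Int) → Bool),
    (PySem.List.combinations xs k).countP (fun p => p.all c && V p)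
      = (PySem.List.combinations (xs.filter c) k).countP V := by
  intro xs
  induction xs with
  | nil =>
    intro k V
    cases k with
    | zero => simp [PySem.List.combinations_zero]
    | succ k => simp [PySem.List.combinations_nil_succ]
  | cons y ys ih =>
    intro k V
    cases k with
    | zero => simp [PySem.List.combinations_zero]
    | succ k =>
      rw [PySem.List.combinations_cons_succ, List.countP_append, List.countP_map]
      by_cases hc : c y = true
      · rw [List.filter_cons_of_pos hc, PySem.List.combinations_cons_succ, List.countP_append,
          List.countP_map]
        have h1 : (PySem.List.combinations ys k).countP ((fun p => p.all c && V p) ∘ (y :: ·))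
            = (PySem.List.combinations ys k).countP (fun p => p.all c && V (y :: p)) := by
          apply List.countP_congr
          intro p _
          simp [hc]
        rw [h1, ih k (fun p => V (y :: p)), ih (k + 1) V]
        rfl
      · have h0 : (PySem.List.combinations ys k).countP ((fun p => p.all c && V p) ∘ (y :: ·)) = 0 := by
          rw [List.countP_eq_zero]
          intro p _
          simp [hc]
        rw [h0, List.filter_cons_of_neg (by simp [hc]), ih (k + 1) V]
        omega

-- getD of add_shift is the shifted pointwise sum
lemma pvAddShift_getD (a b : List Int) (k : ℕ) :
    (pvAddShift a b).getD k 0 = a.getD k 0 + (0 :: b).getD k 0 := by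
  unfold pvAddShift
  by_cases hk : k < max a.length (0 :: b).length
  · rw [PySem.List.getD_map_range _ _ _ _ hk]
  · rw [not_lt] at hk
    rw [List.getD_eq_default, List.getD_eq_default, List.getD_eq_default] <;> simp_all

-- MAIN LEMMA: pvPoly's k-th coefficient counts the valid k-placements among the cells
lemma pvPoly_count : ∀ (N : ℕ) (cs : List (Int × Int)), cs.length ≤ N → ∀ (k : ℕ),
    (pvPoly cs).getD k 0 = ((PySem.List.combinations cs k).countP pvValid : Int) := by
  intro N
  induction N with
  | zero =>
    intro cs hcs k
    rw [List.length_eq_zero_iff.1 (Nat.le_zero.1 hcs)]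
    cases k with
    | zero => simp [pvPoly, PySem.List.combinations_zero, pvValid]
    | succ k => simp [pvPoly, PySem.List.combinations_nil_succ]
  | succ N ih =>
    intro cs hcs k
    cases cs with
    | nil =>
      cases k with
      | zero => simp [pvPoly, PySem.List.combinations_zero, pvValid]
      | succ k => simp [pvPoly, PySem.List.combinations_nil_succ]
    | cons x rest =>
      obtain ⟨r, c⟩ := x
      have hrest : rest.length ≤ N := by simpa using hcs
      have hfil : (rest.filter (fun y => y.1 != r && y.2 != c)).length ≤ N :=
        le_trans (List.length_filter_le _ _) hrest
      rw [show pvPoly ((r, c) :: rest)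
            = pvAddShift (pvPoly rest)
                (pvPoly (rest.filter (fun y => y.1 != r && y.2 != c))) from by rw [pvPoly]]
      rw [pvAddShift_getD]
      cases k with
      | zero =>
        rw [ih rest hrest 0]
        simp [PySem.List.combinations_zero, pvValid]
      | succ k =>
        rw [ih rest hrest (k + 1), show ((0 :: pvPoly (rest.filter (fun y => y.1 != r && y.2 != c))).getD (k + 1) 0)
              = (pvPoly (rest.filter (fun y => y.1 != r && y.2 != c))).getD k 0 from rfl,
          ih _ hfil k]
        rw [PySem.List.combinations_cons_succ, List.countP_append, List.countP_map]
        have h1 : (PySem.List.combinations rest k).countP (pvValid ∘ ((r, c) :: ·))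
            = (PySem.List.combinations rest k).countP
                (fun p => p.all (fun y => y.1 != r && y.2 != c) && pvValid p) := by
          apply List.countP_congr
          intro p _
          simp [pvValid]
        rw [h1, pvKey]
        push_cast
        ring

-- ===== VERDICT (by name: the statement is the Claim_ definition above) =====
theorem rook_polynomial_spec : Claim_equal_rook_polynomial := by
  intro board _ _
  unfold Spec_rook_polynomial rook_polynomial rook_polynomial_alt
  simp only [PySem.List.foldl_append_singleton_eq_map, PySem.List.foldl_if_add_one,
    List.nil_append]
  congr 1
  apply List.map_congr_left
  intro k _
  simp only [pvIsValidA_empty, zero_add]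
  rw [pvPoly_count (pvCellsOf board board.length (PySem.List.pyGetD board 0 []).length).length _ le_rfl k.toNat]
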